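-- pv_equiv track=rewrite | github.com/Cre4T3Tiv3/algorithms-and-data-structures-portfolio | algorithms/dynamic-programming/max_sum_divisible_by_k.py | max_weight_divisible_by_K
-- ===== SOURCE A (Python) =====
-- def max_weight_divisible_by_K(arr, K):
--     """
--     A function to find the maximum weight of apples divisible by K.
--
--     Parameters:
--     - arr: A list of weights of apples.
--     - K: An integer to divide the sum of weights of apples by.
--
--     Returns:
--     - int: The maximum weight of apples divisible by K.
--     """
--     # Initialize the dp table.
--     n = len(arr)
--
--     # Initialize the dp table.
--     dp = [[-float("inf")] * K for _ in range(n + 1)]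
--     # Base case.
--     dp[0][0] = 0
--
--     # Loop over the apples.
--     for i in range(1, n + 1):
--         # Loop over the remainders.
--         for j in range(K):
--             # Check if the current apple is not included.
--             dp[i][j] = max(dp[i][j], dp[i - 1][j])
--             # Check if the current apple is included.
--             dp[i][(j + arr[i - 1]) % K] = max(
--                 dp[i][(j + arr[i - 1]) % K], dp[i - 1][j] + arr[i - 1]
--             )
--     # Return the maximum weight of apples divisible by K.
--     return max(0, dp[n][0])
-- ===== SOURCE B (Python) =====
-- def max_weight_divisible_by_K(arr, K):
--     """Top-down memoized recursion: f(i, j) = best extra sum from arr[i:]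
--     completing remainder j to 0 mod K (None = impossible)."""
--     n = len(arr)
--     memo = {}
--
--     def f(i, j):
--         if i == n:
--             return 0 if j % K == 0 else None
--         key = (i, j)
--         if key in memo:
--             return memo[key]
--         skip = f(i + 1, j)
--         take = f(i + 1, (j + arr[i]) % K)
--         if take is not None:
--             take = take + arr[i]
--         if take is None or (skip is not None and skip >= take):
--             best = skip
--         else:
--             best = take
--         memo[key] = best
--         return best
--
--     r = f(0, 0)
--     return max(0, r if r is not None else 0)
-- ===== Notes on version B (the rewrite author's own statement) =====
-- stated objective: alternative
-- what changed: Replaces the bottom-up (n+1)xK table with row-by-row in-place max updates by a top-down memoized recursion f(i,j) = best extra sum from arr[i:] completing remainder j, with an impossibility sentinel (None) instead of -inf and the max(0,...) floor applied once at the top.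
import Mathlib
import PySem

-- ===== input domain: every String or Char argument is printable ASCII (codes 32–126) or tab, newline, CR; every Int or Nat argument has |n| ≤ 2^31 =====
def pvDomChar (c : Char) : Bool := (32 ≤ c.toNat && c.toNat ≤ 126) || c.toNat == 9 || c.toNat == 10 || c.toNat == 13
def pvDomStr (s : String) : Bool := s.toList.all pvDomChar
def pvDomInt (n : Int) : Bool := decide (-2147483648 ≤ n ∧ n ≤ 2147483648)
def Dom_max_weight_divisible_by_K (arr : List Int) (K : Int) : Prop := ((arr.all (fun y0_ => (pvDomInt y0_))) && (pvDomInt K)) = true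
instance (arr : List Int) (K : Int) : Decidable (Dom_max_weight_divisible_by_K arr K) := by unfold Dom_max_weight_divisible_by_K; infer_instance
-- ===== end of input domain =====

-- B replaces A's bottom-up (n+1)×K table with a top-down recursion on the list
-- (f(i,j) = best extra sum from arr[i:] completing remainder j, None = impossible);
-- same asymptotic cost, different decomposition.

-- ===== PORT A =====
-- -inf is represented by `none`; Python's max over {-inf} ∪ Int is omaxA.
def omaxA : Option Int → Option Int → Option Int
  | none, y => y
  | some x, none => some x
  | some x, some y => some (max x y)

-- dp-row read/write: Python list indexing/assignment at a nonnegative in-range index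
-- (indices are always in range on the admitted inputs).
def rowGet (r : Array (Option Int)) (j : Int) : Option Int := r[j.toNat]?.getD none
def rowSet (r : Array (Option Int)) (j : Int) (v : Option Int) : Array (Option Int) :=
  r.setIfInBounds j.toNat v

-- the inner `for j in range(K)` loop of A, building dp[i] from dp[i-1] (= prev)
def innerA (a K : Int) (prev : Array (Option Int)) : Array (Option Int) :=
  (PySem.List.pyRange 0 K 1).foldl (fun cur j =>
    let cur1 := rowSet cur j (omaxA (rowGet cur j) (rowGet prev j))
    let t := PySem.Int.mod (j + a) K
    rowSet cur1 t (omaxA (rowGet cur1 t) ((rowGet prev j).map (· + a))))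
    (Array.replicate K.toNat none)

def max_weight_divisible_by_K (arr : List Int) (K : Int) : Int :=
  let n := arr.length
  let row0 := rowSet (Array.replicate K.toNat (none : Option Int)) 0 (some 0)
  let fin := (PySem.List.pyRange 1 ((n : Int) + 1) 1).foldl
    (fun prev i => innerA ((PySem.List.pyGet? arr (i - 1)).getD 0) K prev) row0
  match rowGet fin 0 with
  | some v => max 0 v
  | none => 0

-- ===== PORT B =====
-- f(i, j) of Source B, with its memo dict threaded through; the recursion is on the
-- suffix arr[i:] (Source B's `i == n` test is `suffix = []`), i is carried for the memo key.
def altGo (K : Int) : List Int → Int → Int → PySem.Dict (Int × Int) (Option Int) →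
    Option Int × PySem.Dict (Int × Int) (Option Int)
  | [], j, _, memo => (if PySem.Int.mod j K = 0 then some 0 else none, memo)
  | a :: rest, j, i, memo =>
    match memo.get? (i, j) with
    | some v => (v, memo)
    | none =>
      let r1 := altGo K rest j (i + 1) memo
      let r2 := altGo K rest (PySem.Int.mod (j + a) K) (i + 1) r1.2
      let take := r2.1.map (· + a)
      let best :=
        match take, r1.1 with
        | none, s => s
        | some t, none => some t
        | some t, some s => if s ≥ t then some s else some t
      (best, r2.2.insert (i, j) best)

def max_weight_divisible_by_K_alt (arr : List Int) (K : Int) : Int :=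
  match (altGo K arr 0 0 PySem.Dict.empty).1 with
  | some r => max 0 r
  | none => 0

-- ===== PRECONDITION & SPEC =====
-- Python A raises (IndexError at dp[0][0] for K ≤ 0, since [-inf]*K is empty) unless K ≥ 1.
def Pre_max_weight_divisible_by_K (arr : List Int) (K : Int) : Prop := 0 < K
instance (arr : List Int) (K : Int) : Decidable (Pre_max_weight_divisible_by_K arr K) := by
  unfold Pre_max_weight_divisible_by_K; infer_instance
def pvWitness_max_weight_divisible_by_K : List Int × Int := ([3, 1, 2], 3)

def Spec_max_weight_divisible_by_K (arr : List Int) (K : Int) (out : Int) : Prop := out = max_weight_divisible_by_K_alt arr K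
instance (arr : List Int) (K : Int) (out : Int) : Decidable (Spec_max_weight_divisible_by_K arr K out) := by unfold Spec_max_weight_divisible_by_K; infer_instance

-- ===== CLAIM (what is proved, stated in full; the proofs are below) =====
def Claim_equal_max_weight_divisible_by_K : Prop := ∀ (arr : List Int) (K : Int), Dom_max_weight_divisible_by_K arr K → Pre_max_weight_divisible_by_K arr K → Spec_max_weight_divisible_by_K arr K (max_weight_divisible_by_K arr K)


-- ===== LEMMAS AND PROOFS =====

-- Source B's f(i, j) with the memo erased: the pure value of the recursion.
def altF (K : Int) : List Int → Int → Option Int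
  | [], j => if PySem.Int.mod j K = 0 then some 0 else none
  | a :: rest, j =>
    let skip := altF K rest j
    let take := (altF K rest (PySem.Int.mod (j + a) K)).map (· + a)
    match take, skip with
    | none, s => s
    | some t, none => some t
    | some t, some s => if s ≥ t then some s else some t

theorem omaxA_none_right (x : Option Int) : omaxA x none = x := by cases x <;> rfl

theorem omaxA_none_left (x : Option Int) : omaxA none x = x := rfl

theorem if_ext {alpha : Type} {c d : Prop} [Decidable c] [Decidable d] (h : c ↔ d)
    (x y : alpha) : (if c then x else y) = (if d then x else y) := by
  by_cases hc : c
  · rw [if_pos hc, if_pos (h.mp hc)]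
  · rw [if_neg hc, if_neg (fun hd => hc (h.mpr hd))]

theorem omaxA_comm (x y : Option Int) : omaxA x y = omaxA y x := by
  cases x <;> cases y <;> simp [omaxA, max_comm]

theorem omaxA_assoc (x y z : Option Int) : omaxA (omaxA x y) z = omaxA x (omaxA y z) := by
  cases x <;> cases y <;> cases z <;> simp [omaxA, max_assoc]

theorem omaxA_left_comm (x y z : Option Int) : omaxA x (omaxA y z) = omaxA y (omaxA x z) := by
  rw [← omaxA_assoc, omaxA_comm x y, omaxA_assoc]

theorem map_add_omaxA (a : Int) (x y : Option Int) :
    (omaxA x y).map (· + a) = omaxA (x.map (· + a)) (y.map (· + a)) := by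
  cases x <;> cases y <;> simp [omaxA, max_add_add_right]

-- Source B's skip/take combination is omaxA skip take
theorem altF_cons (K a : Int) (l : List Int) (j : Int) :
    altF K (a :: l) j
      = omaxA (altF K l j) ((altF K l (PySem.Int.mod (j + a) K)).map (· + a)) := by
  show (match (altF K l (PySem.Int.mod (j + a) K)).map (· + a), altF K l j with
    | none, s => s
    | some t, none => some t
    | some t, some s => if s ≥ t then some s else some t) = _
  cases altF K l j <;> cases (altF K l (PySem.Int.mod (j + a) K)).map (· + a) <;>
    simp only [omaxA]
  split
  · rw [max_eq_left (by omega)]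
  · rw [max_eq_right (by omega)]

theorem emod_add_left (x y K : Int) : (x % K + y) % K = (x + y) % K := by
  conv_rhs => rw [Int.add_emod]
  rw [Int.add_emod (x % K) y, Int.emod_emod_of_dvd _ dvd_rfl]

theorem altF_congr (K : Int) (hK : 0 < K) (l : List Int) {j1 j2 : Int}
    (h : j1 % K = j2 % K) : altF K l j1 = altF K l j2 := by
  induction l generalizing j1 j2 with
  | nil =>
    simp only [altF, PySem.Int.mod_eq_emod_of_pos hK, h]
  | cons a l ih =>
    rw [altF_cons, altF_cons, ih h]
    congr 1
    rw [ih]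
    simp only [PySem.Int.mod_eq_emod_of_pos hK]
    rw [Int.emod_emod_of_dvd _ dvd_rfl, Int.emod_emod_of_dvd _ dvd_rfl,
      Int.add_emod j1, h, ← Int.add_emod]

-- order-independence: consuming the list from the right obeys the same recurrence
theorem altF_snoc (K : Int) (hK : 0 < K) (l : List Int) (a j : Int) :
    altF K (l ++ [a]) j
      = omaxA (altF K l j) ((altF K l (PySem.Int.mod (j + a) K)).map (· + a)) := by
  induction l generalizing j with
  | nil => simpa using altF_cons K a [] j
  | cons b l ih =>
    rw [List.cons_append, altF_cons, ih, altF_cons, altF_cons, ih]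
    have e1 : altF K l (PySem.Int.mod (PySem.Int.mod (j + b) K + a) K)
        = altF K l (j + b + a) := by
      apply altF_congr K hK
      simp only [PySem.Int.mod_eq_emod_of_pos hK]
      rw [Int.emod_emod_of_dvd _ dvd_rfl, emod_add_left]
    have e2 : altF K l (PySem.Int.mod (PySem.Int.mod (j + a) K + b) K)
        = altF K l (j + a + b) := by
      apply altF_congr K hK
      simp only [PySem.Int.mod_eq_emod_of_pos hK]
      rw [Int.emod_emod_of_dvd _ dvd_rfl, emod_add_left]
    rw [e1, e2]
    have e3 : altF K l (j + b + a) = altF K l (j + a + b) := by ring_nf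
    rw [e3]
    rw [map_add_omaxA, map_add_omaxA, Option.map_map, Option.map_map]
    have e4 : ((· + b) ∘ (· + a) : Int → Int) = ((· + a) ∘ (· + b)) := by
      funext x; simp; ring
    rw [e4]
    rw [omaxA_assoc, omaxA_assoc]
    congr 1
    rw [omaxA_left_comm]

theorem rowSet_size (r : Array (Option Int)) (j : Int) (v : Option Int) :
    (rowSet r j v).size = r.size := by simp [rowSet]

theorem rowGet_rowSet (r : Array (Option Int)) (j t : Int) (v : Option Int)
    (hj : 0 ≤ j) (hjl : j.toNat < r.size) (ht : 0 ≤ t) :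
    rowGet (rowSet r j v) t = if t = j then v else rowGet r t := by
  simp only [rowGet, rowSet, Array.getElem?_setIfInBounds]
  rcases eq_or_ne t j with h | h
  · simp [h, hjl]
  · have hne : j.toNat ≠ t.toNat := by omega
    simp [h, hne]

-- one iteration of A's inner loop, as a named function (proof convenience; innerA unfolds to it)
def stepA (a K : Int) (prev cur : Array (Option Int)) (j : Int) : Array (Option Int) :=
  let cur1 := rowSet cur j (omaxA (rowGet cur j) (rowGet prev j))
  let t := PySem.Int.mod (j + a) K
  rowSet cur1 t (omaxA (rowGet cur1 t) ((rowGet prev j).map (· + a)))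

theorem innerA_eq (a K : Int) (prev : Array (Option Int)) :
    innerA a K prev
      = (PySem.List.pyRange 0 K 1).foldl (stepA a K prev) (Array.replicate K.toNat none) := rfl

theorem rowGet_replicate (n : Nat) (t : Int) :
    rowGet (Array.replicate n (none : Option Int)) t = none := by
  simp only [rowGet, Array.getElem?_replicate]
  split <;> rfl

theorem innerA_partial (a K : Int) (hK : 0 < K) (prev : Array (Option Int))
    (hlen : prev.size = K.toNat) (m : Nat) (hm : (m : Int) ≤ K) :
    ((PySem.List.pyRange 0 (m : Int) 1).foldl (stepA a K prev)
        (Array.replicate K.toNat none)).size = K.toNat ∧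
    ∀ t : Int, 0 ≤ t → t < K →
      rowGet ((PySem.List.pyRange 0 (m : Int) 1).foldl (stepA a K prev)
          (Array.replicate K.toNat none)) t
        = omaxA (if t < (m : Int) then rowGet prev t else none)
            (if (t - a) % K < (m : Int) then (rowGet prev ((t - a) % K)).map (· + a)
             else none) := by
  induction m with
  | zero =>
    rw [PySem.List.pyRange_one_eq_nil (by simp)]
    refine ⟨by simp, fun t ht htK => ?_⟩
    have h2 : 0 ≤ (t - a) % K := Int.emod_nonneg _ (by omega)
    rw [List.foldl_nil, if_neg (by omega), if_neg (by omega), rowGet_replicate]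
    rfl
  | succ m ih =>
    have hm' : (m : Int) ≤ K := by push_cast at hm ⊢; omega
    obtain ⟨ihL, ihG⟩ := ih hm'
    have hm0 : (0 : Int) ≤ (m : Int) := by positivity
    have hsplit : PySem.List.pyRange 0 ((m : Int) + 1) 1
        = PySem.List.pyRange 0 (m : Int) 1 ++ [(m : Int)] :=
      PySem.List.pyRange_one_succ_right hm0
    push_cast
    rw [hsplit, List.foldl_append, List.foldl_cons, List.foldl_nil]
    set st := (PySem.List.pyRange 0 (m : Int) 1).foldl (stepA a K prev)
        (Array.replicate K.toNat none) with hstdef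
    have hmK : (m : Int) < K := by push_cast at hm; omega
    have hts : 0 ≤ ((m : Int) + a) % K ∧ ((m : Int) + a) % K < K :=
      ⟨Int.emod_nonneg _ (by omega), Int.emod_lt_of_pos _ hK⟩
    have hmod : PySem.Int.mod ((m : Int) + a) K = ((m : Int) + a) % K :=
      PySem.Int.mod_eq_emod_of_pos hK
    have hmm : (m : Int) % K = (m : Int) := Int.emod_eq_of_lt hm0 hmK
    set S := ((m : Int) + a) % K with hSdef
    set v1 := omaxA (rowGet st (m : Int)) (rowGet prev (m : Int)) with hv1
    have hcur1len : (rowSet st (m : Int) v1).size = K.toNat := by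
      rw [rowSet_size, ihL]
    have hstep : stepA a K prev st (m : Int)
        = rowSet (rowSet st (m : Int) v1) S
            (omaxA (rowGet (rowSet st (m : Int) v1) S) ((rowGet prev (m : Int)).map (· + a))) := by
      simp only [stepA, hmod, hv1, hSdef]
    rw [hstep]
    have hc1 : ∀ u : Int, 0 ≤ u →
        rowGet (rowSet st (m : Int) v1) u = if u = (m : Int) then v1 else rowGet st u :=
      fun u hu => rowGet_rowSet _ _ _ _ hm0 (by rw [ihL]; omega) hu
    constructor
    · rw [rowSet_size, hcur1len]
    · intro t ht htK
      have htb : 0 ≤ (t - a) % K ∧ (t - a) % K < K :=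
        ⟨Int.emod_nonneg _ (by omega), Int.emod_lt_of_pos _ hK⟩
      have htt : t % K = t := Int.emod_eq_of_lt ht htK
      -- uniqueness of the written remainder slot
      have hF2 : ∀ u : Int, 0 ≤ u → u < K → u ≠ S → (u - a) % K ≠ (m : Int) := by
        intro u hu huK hne hEq
        apply hne
        have h1 : S = u := by
          rw [hSdef, ← hEq, emod_add_left]
          have e : u - a + a = u := by ring
          rw [e, Int.emod_eq_of_lt hu huK]
        exact h1.symm
      have hF1 : (S - a) % K = (m : Int) := by
        rw [hSdef, sub_eq_add_neg, emod_add_left]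
        have e : (m : Int) + a + -a = (m : Int) := by ring
        rw [e, hmm]
      rw [rowGet_rowSet _ _ _ _ hts.1 (by rw [hcur1len]; omega) ht, hc1 S hts.1, hc1 t ht]
      by_cases hteq : t = S
      · rw [if_pos hteq]
        by_cases hSM : S = (m : Int)
        · -- the two writes hit the same slot: K divides a
          have ha : a % K = 0 := by
            have h1 : ((m : Int) + a) % K = (m : Int) % K := by rw [← hSdef, hSM, hmm]
            have h2 := Int.emod_eq_emod_iff_emod_sub_eq_zero.mp h1
            have e : (m : Int) + a - (m : Int) = a := by ring
            rwa [e] at h2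
          have hBM : ((m : Int) - a) % K = (m : Int) := by
            rw [Int.sub_emod, ha, hmm, sub_zero, hmm]
          have htM : t = (m : Int) := by rw [hteq, hSM]
          subst htM
          rw [if_pos hSM, hv1, ihG (m : Int) hm0 hmK]
          rw [hBM]
          simp only [if_neg (show ¬ ((m : Int) < (m : Int)) by omega),
            if_pos (show (m : Int) < (m : Int) + 1 by omega)]
          rfl
        · -- slot S was not the skip slot of this iteration
          subst hteq
          rw [if_neg hSM, ihG S hts.1 hts.2, hF1,
            if_neg (show ¬ ((m : Int) < (m : Int)) by omega), omaxA_none_right,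
            if_pos (show (m : Int) < (m : Int) + 1 by omega),
            if_ext (show S < (m : Int) + 1 ↔ S < (m : Int) by
              constructor
              · intro h
                rcases lt_or_eq_of_le (by omega : S ≤ (m : Int)) with h' | h'
                · exact h'
                · exact absurd h' hSM
              · intro h; omega) _ (none : Option Int)]
      · rw [if_neg hteq]
        have hBt : (t - a) % K ≠ (m : Int) := hF2 t ht htK hteq
        by_cases htM : t = (m : Int)
        · subst htM
          rw [if_pos rfl, hv1, ihG (m : Int) hm0 hmK,
            if_neg (show ¬ ((m : Int) < (m : Int)) by omega), omaxA_none_left,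
            if_pos (show (m : Int) < (m : Int) + 1 by omega)]
          generalize hg : ((m : Int) - a) % K = B at hBt ⊢
          rw [if_ext (show B < (m : Int) + 1 ↔ B < (m : Int) by omega) _ (none : Option Int)]
          exact omaxA_comm _ _
        · rw [if_neg htM, ihG t ht htK]
          generalize hg : (t - a) % K = B at hBt ⊢
          rw [if_ext (show t < (m : Int) + 1 ↔ t < (m : Int) by omega) _ (none : Option Int),
            if_ext (show B < (m : Int) + 1 ↔ B < (m : Int) by omega) _ (none : Option Int)]

theorem innerA_spec (a K : Int) (hK : 0 < K) (prev : Array (Option Int))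
    (hlen : prev.size = K.toNat) :
    (innerA a K prev).size = K.toNat ∧
    ∀ t : Int, 0 ≤ t → t < K →
      rowGet (innerA a K prev) t
        = omaxA (rowGet prev t) ((rowGet prev ((t - a) % K)).map (· + a)) := by
  obtain ⟨h1, h2⟩ := innerA_partial a K hK prev hlen K.toNat (by omega)
  have hKK : ((K.toNat : Nat) : Int) = K := by omega
  rw [hKK] at h1 h2
  rw [innerA_eq]
  refine ⟨h1, fun t ht htK => ?_⟩
  rw [h2 t ht htK, if_pos htK, if_pos (Int.emod_lt_of_pos _ hK)]

-- invariant of A's outer loop: row after prefix p holds altF of p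
theorem outer_invariant (K : Int) (hK : 0 < K) (p : List Int)
    (st : Array (Option Int))
    (hlen : st.size = K.toNat)
    (hst : ∀ t : Int, 0 ≤ t → t < K → rowGet st t = altF K p (-t)) (a : Int) :
    (innerA a K st).size = K.toNat ∧
    ∀ t : Int, 0 ≤ t → t < K → rowGet (innerA a K st) t = altF K (p ++ [a]) (-t) := by
  obtain ⟨h1, h2⟩ := innerA_spec a K hK st hlen
  refine ⟨h1, fun t ht htK => ?_⟩
  rw [h2 t ht htK, altF_snoc K hK, hst t ht htK]
  have hb : 0 ≤ (t - a) % K ∧ (t - a) % K < K :=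
    ⟨Int.emod_nonneg _ (by omega), Int.emod_lt_of_pos _ hK⟩
  rw [hst _ hb.1 hb.2]
  congr 1
  congr 1
  apply altF_congr K hK
  simp only [PySem.Int.mod_eq_emod_of_pos hK]
  rw [Int.emod_emod_of_dvd _ dvd_rfl]
  conv_lhs => rw [show (-((t - a) % K)) = 0 - (t - a) % K by ring]
  rw [Int.sub_emod, Int.emod_emod_of_dvd _ dvd_rfl, ← Int.sub_emod]
  congr 1
  ring

-- the outer `for i in range(1, n+1)` fold is a fold over arr
theorem foldlCongrMem {alpha beta : Type} (l : List alpha) (f g : beta → alpha → beta)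
    (s : beta) (h : ∀ s x, x ∈ l → f s x = g s x) : l.foldl f s = l.foldl g s := by
  induction l generalizing s with
  | nil => rfl
  | cons a l ih =>
    rw [List.foldl_cons, List.foldl_cons, h s a (List.mem_cons_self)]
    exact ih _ (fun s x hx => h s x (List.mem_cons_of_mem _ hx))

theorem outer_fold (K : Int) (l : List Int) (s0 : Array (Option Int)) :
    (PySem.List.pyRange 1 ((l.length : Int) + 1) 1).foldl
      (fun prev i => innerA ((PySem.List.pyGet? l (i - 1)).getD 0) K prev) s0
    = l.foldl (fun prev x => innerA x K prev) s0 := by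
  induction l using List.reverseRecOn generalizing s0 with
  | nil =>
    rw [List.foldl_nil, PySem.List.pyRange_one_eq_nil (by simp), List.foldl_nil]
  | append_singleton l a ih =>
    have hlen : (((l ++ [a]).length : Nat) : Int) + 1 = ((l.length : Int) + 1) + 1 := by
      simp
    rw [hlen,
      PySem.List.pyRange_one_succ_right (by omega),
      List.foldl_append, List.foldl_cons, List.foldl_nil]
    have hcongr : (PySem.List.pyRange 1 ((l.length : Int) + 1) 1).foldl
          (fun prev i => innerA ((PySem.List.pyGet? (l ++ [a]) (i - 1)).getD 0) K prev) s0
        = (PySem.List.pyRange 1 ((l.length : Int) + 1) 1).foldl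
          (fun prev i => innerA ((PySem.List.pyGet? l (i - 1)).getD 0) K prev) s0 := by
      apply foldlCongrMem
      intro s i hi
      rw [PySem.List.mem_pyRange_one] at hi
      have h1 : 0 ≤ i - 1 := by omega
      rw [PySem.List.pyGet?_of_nonneg _ h1, PySem.List.pyGet?_of_nonneg _ h1,
        List.getElem?_append_left (by omega)]
    rw [hcongr, ih]
    have harg : (PySem.List.pyGet? (l ++ [a]) ((l.length : Int) + 1 - 1)).getD 0 = a := by
      have e : ((l.length : Int) + 1 - 1) = ((l.length : Nat) : Int) := by ring
      rw [e, PySem.List.pyGet?_natCast]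
      simp
    rw [harg, List.foldl_append, List.foldl_cons, List.foldl_nil]

theorem fold_rows (K : Int) (hK : 0 < K) (l : List Int) :
    (l.foldl (fun prev x => innerA x K prev)
        (rowSet (Array.replicate K.toNat none) 0 (some 0))).size = K.toNat ∧
    ∀ t : Int, 0 ≤ t → t < K →
      rowGet (l.foldl (fun prev x => innerA x K prev)
          (rowSet (Array.replicate K.toNat none) 0 (some 0))) t = altF K l (-t) := by
  induction l using List.reverseRecOn with
  | nil =>
    constructor
    · rw [List.foldl_nil, rowSet_size, Array.size_replicate]
    · intro t ht htK
      rw [List.foldl_nil,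
        rowGet_rowSet _ _ _ _ le_rfl (by simp; omega) ht]
      have hiff : (-t) % K = 0 ↔ t = 0 := by
        constructor
        · intro h
          have hd : K ∣ t := dvd_neg.mp (Int.dvd_of_emod_eq_zero h)
          have h2 : t % K = 0 := Int.emod_eq_zero_of_dvd hd
          rwa [Int.emod_eq_of_lt ht htK] at h2
        · intro h; simp [h]
      simp only [altF, PySem.Int.mod_eq_emod_of_pos hK]
      by_cases h0 : t = 0
      · rw [if_pos h0, if_pos (hiff.mpr h0)]
      · rw [if_neg h0, rowGet_replicate, if_neg (fun hh => h0 (hiff.mp hh))]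
  | append_singleton l a ih =>
    rw [List.foldl_append, List.foldl_cons, List.foldl_nil]
    exact outer_invariant K hK l _ ih.1 ih.2 a

-- memoization correctness: altGo returns altF's value and only caches correct values
theorem altGo_spec (K : Int) (arr : List Int) (rest : List Int) :
    ∀ (j i : Int) (memo : PySem.Dict (Int × Int) (Option Int)),
    0 ≤ i → rest = arr.drop i.toNat →
    (∀ i' j' v, memo.get? (i', j') = some v → v = altF K (arr.drop i'.toNat) j') →
    (altGo K rest j i memo).1 = altF K rest j ∧
    (∀ i' j' v, (altGo K rest j i memo).2.get? (i', j') = some v →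
      v = altF K (arr.drop i'.toNat) j') := by
  induction rest with
  | nil =>
    intro j i memo hi hdrop hInv
    exact ⟨rfl, hInv⟩
  | cons a rest ih =>
    intro j i memo hi hdrop hInv
    have hdrop' : rest = arr.drop (i + 1).toNat := by
      have e1 : (i + 1).toNat = i.toNat + 1 := by omega
      rw [e1, ← List.drop_drop, ← hdrop]
      rfl
    cases hm : memo.get? (i, j) with
    | some v =>
      simp only [altGo, hm]
      refine ⟨?_, hInv⟩
      rw [hInv i j v hm, ← hdrop]
    | none =>
      obtain ⟨h1a, h1b⟩ := ih j (i + 1) memo (by omega) hdrop' hInv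
      obtain ⟨h2a, h2b⟩ :=
        ih (PySem.Int.mod (j + a) K) (i + 1) (altGo K rest j (i + 1) memo).2
          (by omega) hdrop' h1b
      simp only [altGo, hm]
      rw [h1a, h2a]
      constructor
      · rfl
      · intro i' j' v hv
        by_cases hk : (i', j') = (i, j)
        · rw [hk, PySem.Dict.get?_insert_self] at hv
          cases hv
          have hij : i' = i ∧ j' = j := by
            constructor <;> [exact congrArg Prod.fst hk; exact congrArg Prod.snd hk]
          rw [hij.1, hij.2, ← hdrop]
          rfl
        · rw [PySem.Dict.get?_insert_of_ne _ _ hk] at hv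
          exact h2b i' j' v hv

-- B's port computes altF's value
theorem alt_eq_altF (arr : List Int) (K : Int) :
    max_weight_divisible_by_K_alt arr K
      = match altF K arr 0 with
        | some r => max 0 r
        | none => 0 := by
  have h := (altGo_spec K arr arr 0 0 PySem.Dict.empty le_rfl (by simp)
    (fun i' j' v hv => by rw [PySem.Dict.get?_empty] at hv; cases hv)).1
  simp only [max_weight_divisible_by_K_alt, h]

-- ===== VERDICT (by name: the statement is the Claim_ definition above) =====
theorem max_weight_divisible_by_K_spec : Claim_equal_max_weight_divisible_by_K := by
  intro arr K _ hK
  unfold Spec_max_weight_divisible_by_K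
  simp only [max_weight_divisible_by_K]
  rw [alt_eq_altF, outer_fold K arr]
  obtain ⟨hL, hG⟩ := fold_rows K hK arr
  have h0 := hG 0 le_rfl hK
  rw [neg_zero] at h0
  rw [h0]
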